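-- pv_equiv track=rewrite | github.com/RadouanFARAH/chatbot | actions/actions.py | verifier_cin
-- ===== SOURCE A (Python) =====
-- def verifier_cin(cin):
--     alp=['a','b','c','d','e','f','j','h','i','g','k','l','m','n','o','p','q','r','s','t','u','v','w','x','y','z']
--     num=['1','2','3','4','5','6','7','8','9','0']
--     if(len(cin) < 6 or len(cin) > 8):
--         return False
--     else:
--         if(cin[0].lower() in alp and cin[1].lower() not in alp):
--             for i in cin[1:]:
--                 if(i not in num):
--                     return False
--
--             return True
--
--         elif((cin[0].lower() in alp) and (cin[1].lower() in alp)):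
--              for i in cin[2:]:
--                 if(i not in num):
--                     return False
--
--              return True
--
--         else:
--             return False
-- ===== SOURCE B (Python) =====
-- import re
--
-- def verifier_cin(cin):
--     if len(cin) < 6 or len(cin) > 8:
--         return False
--     return re.fullmatch(r'[a-zA-Z]{1,2}[0-9]+', cin) is not None
-- ===== Notes on version B (the rewrite author's own statement) =====
-- stated objective: idiomatic
-- what changed: Replaces the hand-rolled letter/digit list memberships, two accept-branches and per-branch character loops with a single length guard plus one regex fullmatch ([a-zA-Z]{1,2}[0-9]+).
import Mathlib
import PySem

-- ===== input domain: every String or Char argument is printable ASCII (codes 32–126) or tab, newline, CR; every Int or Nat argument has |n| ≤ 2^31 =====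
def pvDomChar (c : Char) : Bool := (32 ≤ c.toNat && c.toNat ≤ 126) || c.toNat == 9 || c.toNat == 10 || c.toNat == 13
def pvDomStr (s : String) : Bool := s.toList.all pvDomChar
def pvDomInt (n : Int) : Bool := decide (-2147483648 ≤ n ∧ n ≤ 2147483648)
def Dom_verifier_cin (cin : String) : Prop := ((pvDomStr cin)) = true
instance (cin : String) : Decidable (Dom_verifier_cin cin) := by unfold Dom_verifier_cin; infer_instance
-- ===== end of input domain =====

-- B replaces A's hand-rolled letter/digit lists, two accept-branches and per-branch loops
-- with a length guard plus one regex fullmatch ([a-zA-Z]{1,2}[0-9]+) — more idiomatic, same behaviour.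

-- ===== PORT A =====
-- A's `alp` list of single-character strings, as List Char singletons (same order as the source)
def pvAlp : List (List Char) :=
  [['a'],['b'],['c'],['d'],['e'],['f'],['j'],['h'],['i'],['g'],['k'],['l'],['m'],
   ['n'],['o'],['p'],['q'],['r'],['s'],['t'],['u'],['v'],['w'],['x'],['y'],['z']]
-- A's `num` list
def pvNum : List (List Char) :=
  [['1'],['2'],['3'],['4'],['5'],['6'],['7'],['8'],['9'],['0']]

def verifier_cin (cin : String) : Bool :=
  if PySem.Chars.len cin.toList < 6 ∨ PySem.Chars.len cin.toList > 8 then false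
  else
    -- cin[0] / cin[1]: in range here since len(cin) ≥ 6, so pyGetD's default is never used
    if PySem.Chars.lower [PySem.List.pyGetD cin.toList 0 ' '] ∈ pvAlp ∧
       PySem.Chars.lower [PySem.List.pyGetD cin.toList 1 ' '] ∉ pvAlp then
      -- for i in cin[1:]: if i not in num: return False / return True
      (PySem.List.slice cin.toList (some 1) none).all (fun i => decide ([i] ∈ pvNum))
    else if PySem.Chars.lower [PySem.List.pyGetD cin.toList 0 ' '] ∈ pvAlp ∧
            PySem.Chars.lower [PySem.List.pyGetD cin.toList 1 ' '] ∈ pvAlp then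
      (PySem.List.slice cin.toList (some 2) none).all (fun i => decide ([i] ∈ pvNum))
    else false

-- ===== PORT B =====
-- regex character classes [a-zA-Z] and [0-9] (ASCII codes)
def pvIsAsciiLetter (c : Char) : Bool := (97 ≤ c.toNat && c.toNat ≤ 122) || (65 ≤ c.toNat && c.toNat ≤ 90)
def pvIsAsciiDigit (c : Char) : Bool := 48 ≤ c.toNat && c.toNat ≤ 57
-- hand port of re.fullmatch(r'[a-zA-Z]{1,2}[0-9]+', s): exact — the greedy {1,2} takes two
-- letters when it can; backtracking to one letter can only succeed when the second char is a digit
def pvReFullmatch : List Char → Bool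
  | c1 :: c2 :: rest =>
      pvIsAsciiLetter c1 &&
        (if pvIsAsciiLetter c2 then !rest.isEmpty && rest.all pvIsAsciiDigit
         else (c2 :: rest).all pvIsAsciiDigit)
  | _ => false  -- fewer than 2 chars can never match (≥1 letter and ≥1 digit needed)

def verifier_cin_alt (cin : String) : Bool :=
  if PySem.Str.len cin < 6 ∨ PySem.Str.len cin > 8 then false
  else pvReFullmatch cin.toList

-- ===== PRECONDITION & SPEC =====
def Spec_verifier_cin (cin : String) (out : Bool) : Prop := out = verifier_cin_alt cin
instance (cin : String) (out : Bool) : Decidable (Spec_verifier_cin cin out) := by unfold Spec_verifier_cin; infer_instance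

-- ===== CLAIM (what is proved, stated in full; the proofs are below) =====
def Claim_equal_verifier_cin : Prop := ∀ (cin : String), Dom_verifier_cin cin → Spec_verifier_cin cin (verifier_cin cin)

-- ===== LEMMAS AND PROOFS =====

theorem pv_char_eq_iff (c d : Char) : c = d ↔ c.toNat = d.toNat := by
  constructor
  · rintro rfl; rfl
  · intro h; exact Char.ext (UInt32.toNat_inj.mp h)

theorem pv_mem_num (c : Char) : ([c] ∈ pvNum) ↔ pvIsAsciiDigit c = true := by
  simp only [pvNum, List.mem_cons, List.not_mem_nil, or_false, List.cons.injEq, and_true,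
    pv_char_eq_iff, pvIsAsciiDigit, Bool.and_eq_true, decide_eq_true_eq,
    show '1'.toNat = 49 from rfl, show '2'.toNat = 50 from rfl, show '3'.toNat = 51 from rfl, show '4'.toNat = 52 from rfl, show '5'.toNat = 53 from rfl, show '6'.toNat = 54 from rfl, show '7'.toNat = 55 from rfl, show '8'.toNat = 56 from rfl, show '9'.toNat = 57 from rfl, show '0'.toNat = 48 from rfl]
  omega

theorem pv_mem_alp (c : Char) : (PySem.Chars.lower [c] ∈ pvAlp) ↔ pvIsAsciiLetter c = true := by
  have hmem : ∀ d : Char, ([d] ∈ pvAlp) ↔ (97 ≤ d.toNat ∧ d.toNat ≤ 122) := by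
    intro d
    simp only [pvAlp, List.mem_cons, List.not_mem_nil, or_false, List.cons.injEq, and_true,
      pv_char_eq_iff,
      show 'a'.toNat = 97 from rfl, show 'b'.toNat = 98 from rfl, show 'c'.toNat = 99 from rfl, show 'd'.toNat = 100 from rfl, show 'e'.toNat = 101 from rfl, show 'f'.toNat = 102 from rfl, show 'g'.toNat = 103 from rfl, show 'h'.toNat = 104 from rfl, show 'i'.toNat = 105 from rfl, show 'j'.toNat = 106 from rfl, show 'k'.toNat = 107 from rfl, show 'l'.toNat = 108 from rfl, show 'm'.toNat = 109 from rfl, show 'n'.toNat = 110 from rfl, show 'o'.toNat = 111 from rfl, show 'p'.toNat = 112 from rfl, show 'q'.toNat = 113 from rfl, show 'r'.toNat = 114 from rfl, show 's'.toNat = 115 from rfl, show 't'.toNat = 116 from rfl, show 'u'.toNat = 117 from rfl, show 'v'.toNat = 118 from rfl, show 'w'.toNat = 119 from rfl, show 'x'.toNat = 120 from rfl, show 'y'.toNat = 121 from rfl, show 'z'.toNat = 122 from rfl]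
    omega
  simp only [PySem.Chars.lower, List.map, PySem.Chars.lowerChar, PySem.Chars.isupper, hmem,
    pvIsAsciiLetter, Bool.or_eq_true, Bool.and_eq_true, decide_eq_true_eq]
  by_cases hu : 'A' ≤ c ∧ c ≤ 'Z'
  · have h1 : 65 ≤ c.toNat := hu.1
    have h2 : c.toNat ≤ 90 := hu.2
    rw [if_pos hu]
    rw [Char.toNat_ofNat, if_pos (by constructor; omega)]
    omega
  · rw [if_neg hu]
    have hn : ¬ (65 ≤ c.toNat ∧ c.toNat ≤ 90) := by
      intro h
      exact hu ⟨(by exact h.1 : ('A' : Char) ≤ c), (by exact h.2 : c ≤ 'Z')⟩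
    omega

theorem pv_decide_num (c : Char) : decide ([c] ∈ pvNum) = pvIsAsciiDigit c := by
  by_cases h : pvIsAsciiDigit c = true
  · simp [pv_mem_num, h]
  · simp only [Bool.not_eq_true] at h
    simp [pv_mem_num, h]

theorem pv_all_num (l : List Char) :
    l.all (fun i => decide ([i] ∈ pvNum)) = l.all pvIsAsciiDigit := by
  simp only [pv_decide_num]

theorem pv_main (cs : List Char) :
    (if ((cs.length : Int) < 6) ∨ ((cs.length : Int) > 8) then false
     else
       if PySem.Chars.lower [PySem.List.pyGetD cs 0 ' '] ∈ pvAlp ∧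
          PySem.Chars.lower [PySem.List.pyGetD cs 1 ' '] ∉ pvAlp then
         (PySem.List.slice cs (some 1) none).all (fun i => decide ([i] ∈ pvNum))
       else if PySem.Chars.lower [PySem.List.pyGetD cs 0 ' '] ∈ pvAlp ∧
               PySem.Chars.lower [PySem.List.pyGetD cs 1 ' '] ∈ pvAlp then
         (PySem.List.slice cs (some 2) none).all (fun i => decide ([i] ∈ pvNum))
       else false) =
    (if ((cs.length : Int) < 6) ∨ ((cs.length : Int) > 8) then false
     else pvReFullmatch cs) := by
  by_cases hlen : (((cs.length : Int) < 6) ∨ ((cs.length : Int) > 8))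
  · rw [if_pos hlen, if_pos hlen]
  · rw [if_neg hlen, if_neg hlen]
    have h6 : 6 ≤ cs.length := by omega
    match cs, h6 with
    | c0 :: c1 :: rest, h6 =>
      simp only [List.length_cons] at h6
      have hget0 : PySem.List.pyGetD (c0 :: c1 :: rest) 0 ' ' = c0 := by simp [pysem]
      have hget1 : PySem.List.pyGetD (c0 :: c1 :: rest) 1 ' ' = c1 := by simp [pysem]
      have hs1 : PySem.List.slice (c0 :: c1 :: rest) (some 1) none = c1 :: rest := by
        rw [PySem.List.slice_from_one]; rfl
      have hs2 : PySem.List.slice (c0 :: c1 :: rest) (some 2) none = rest := by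
        rw [PySem.List.slice_from]; rfl; omega
      rw [hget0, hget1, hs1, hs2, pvReFullmatch]
      have hne : rest.isEmpty = false := by
        cases rest with
        | nil => simp at h6
        | cons a t => rfl
      by_cases hA : pvIsAsciiLetter c0 = true
      · by_cases hB : pvIsAsciiLetter c1 = true
        · rw [if_neg (by rw [pv_mem_alp, pv_mem_alp]; tauto),
            if_pos (by rw [pv_mem_alp, pv_mem_alp]; exact ⟨hA, hB⟩),
            if_pos hB]
          simp [pv_all_num, hA, hne]
        · rw [if_pos (by rw [pv_mem_alp, pv_mem_alp]; exact ⟨hA, by simp [hB]⟩),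
            if_neg (by simp [hB])]
          simp only [List.all_cons, pv_decide_num, hA, Bool.true_and]
      · rw [if_neg (by rw [pv_mem_alp, pv_mem_alp]; tauto),
          if_neg (by rw [pv_mem_alp, pv_mem_alp]; tauto)]
        simp [hA]

-- ===== VERDICT (by name: the statement is the Claim_ definition above) =====
theorem verifier_cin_spec : Claim_equal_verifier_cin := by
  intro cin _
  unfold Spec_verifier_cin verifier_cin verifier_cin_alt
  simp only [PySem.Chars.len_eq, PySem.Str.len_eq]
  exact pv_main cin.toList
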